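-- pv_equiv track=rewrite | github.com/zp001/es_material_search | es_search/material_data_process/get_result_data/get_jie_data2.py | title_smallTitle
-- ===== SOURCE A (Python) =====
-- def title_smallTitle(title_index,small_title_index,title,small_title):
--     ts=title_index+small_title_index
--     ts=sorted(ts)
--     ts_list=[]
--     d=0
--     for j in range(len(title_index)):
--         ts_dic = {}
--         if j!=len(title_index)-1:
--             ind1=ts.index(title_index[j])
--             ind2 = ts.index(title_index[j+1])
--             s = len(ts[ind1 + 1:ind2])
--             d = d + s
--             ts_dic[title[j]] = small_title[d - s:d]
--             #ts_dic[title[j]]=ts[ind1+1:ind2]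
--         else:
--             ind1=ts.index(title_index[j])
--             s = len(ts[ind1 + 1:])
--             ts_dic[title[j]] = small_title[d - s:d]
--             #ts_dic[title[j]] = ts[ind1 + 1:]
--         ts_list.append(ts_dic)
--     return ts_list
-- ===== SOURCE B (Python) =====
-- def title_smallTitle(title_index, small_title_index, title, small_title):
--     # The first occurrence of v in sorted(title_index + small_title_index) sits at the
--     # position equal to the number of elements strictly smaller than v, so no merged
--     # sorted list is ever built: ranks are obtained by direct counting.
--     def rank(v):
--         return (sum(1 for x in title_index if x < v)
--                 + sum(1 for x in small_title_index if x < v))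
--     n = len(title_index) + len(small_title_index)
--     m = len(title_index)
--     ranks = [rank(v) for v in title_index]
--     out = []
--     d = 0
--     for j in range(m - 1):
--         s = max(0, ranks[j + 1] - ranks[j] - 1)
--         d += s
--         out.append({title[j]: small_title[d - s:d]})
--     if m > 0:
--         s = n - 1 - ranks[m - 1]
--         out.append({title[m - 1]: small_title[d - s:d]})
--     return out
-- ===== Notes on version B (the rewrite author's own statement) =====
-- stated objective: alternative
-- what changed: B never builds or scans the merged sorted list: each title index's position is the count of strictly smaller elements across both index lists, computed by direct counting, and the output is assembled in staged passes (ranks list, gap loop over the first m-1 titles, separate last element) instead of A's sort + repeated ts.index scans inside one branching loop.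
import Mathlib
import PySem

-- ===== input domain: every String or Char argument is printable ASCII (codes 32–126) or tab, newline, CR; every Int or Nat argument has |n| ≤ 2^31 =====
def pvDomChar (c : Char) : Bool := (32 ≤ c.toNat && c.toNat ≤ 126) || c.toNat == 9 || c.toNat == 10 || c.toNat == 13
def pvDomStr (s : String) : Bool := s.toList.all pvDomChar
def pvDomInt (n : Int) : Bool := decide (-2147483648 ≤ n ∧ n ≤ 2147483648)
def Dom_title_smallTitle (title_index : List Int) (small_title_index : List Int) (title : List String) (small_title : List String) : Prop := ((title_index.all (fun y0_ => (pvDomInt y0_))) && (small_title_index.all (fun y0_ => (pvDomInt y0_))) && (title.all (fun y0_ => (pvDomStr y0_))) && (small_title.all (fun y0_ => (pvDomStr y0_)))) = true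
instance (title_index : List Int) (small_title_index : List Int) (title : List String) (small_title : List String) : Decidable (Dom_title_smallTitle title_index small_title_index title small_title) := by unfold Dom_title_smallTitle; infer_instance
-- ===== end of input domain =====

-- B avoids the merged sorted list entirely: a title index's first-occurrence position is
-- the count of strictly smaller elements in the two lists, so ranks are obtained by direct
-- counting and the result is assembled in staged passes (objective: alternative).

-- ===== PORT A =====
def title_smallTitle (title_index : List Int) (small_title_index : List Int) (title : List String) (small_title : List String) : List (List (String × List String)) :=
  let ts := PySem.List.sorted (title_index ++ small_title_index) (fun x => x)
  let m := title_index.length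
  ((List.range m).foldl (fun (st : List (List (String × List String)) × Int) j =>
    let ts_list := st.1
    let d := st.2
    if j ≠ m - 1 then
      let ind1 : Nat := (PySem.List.index? ts (title_index.getD j 0)).getD 0
      let ind2 : Nat := (PySem.List.index? ts (title_index.getD (j + 1) 0)).getD 0
      let s : Nat := (PySem.List.slice ts (some ((ind1 : Int) + 1)) (some (ind2 : Int))).length
      let d' := d + (s : Int)
      (ts_list ++ [[(title.getD j "", PySem.List.slice small_title (some (d' - (s : Int))) (some d'))]], d')
    else
      let ind1 : Nat := (PySem.List.index? ts (title_index.getD j 0)).getD 0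
      let s : Nat := (PySem.List.slice ts (some ((ind1 : Int) + 1)) none).length
      (ts_list ++ [[(title.getD j "", PySem.List.slice small_title (some (d - (s : Int))) (some d))]], d))
    ([], 0)).1

-- ===== PORT B =====
-- rank v = number of elements strictly smaller than v across both index lists
def pvRank (title_index : List Int) (small_title_index : List Int) (v : Int) : Int :=
  title_index.foldl (fun acc x => if x < v then acc + 1 else acc) 0
    + small_title_index.foldl (fun acc x => if x < v then acc + 1 else acc) 0

def title_smallTitle_alt (title_index : List Int) (small_title_index : List Int) (title : List String) (small_title : List String) : List (List (String × List String)) :=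
  let n : Int := (title_index.length : Int) + (small_title_index.length : Int)
  let m := title_index.length
  let ranks : List Int := title_index.map (pvRank title_index small_title_index)
  let st :=
    ((List.range (m - 1)).foldl (fun (st : List (List (String × List String)) × Int) j =>
      let s : Int := max 0 (ranks.getD (j + 1) 0 - ranks.getD j 0 - 1)
      let d := st.2 + s
      (st.1 ++ [[(title.getD j "", PySem.List.slice small_title (some (d - s)) (some d))]], d))
      ([], 0))
  if 0 < m then
    let s : Int := n - 1 - ranks.getD (m - 1) 0
    st.1 ++ [[(title.getD (m - 1) "", PySem.List.slice small_title (some (st.2 - s)) (some st.2))]]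
  else st.1

-- ===== PRECONDITION & SPEC =====
-- Pre_ excludes only inputs where A raises: title[j] is an IndexError when title has fewer
-- entries than title_index (B raises there too).
def Pre_title_smallTitle (title_index : List Int) (small_title_index : List Int) (title : List String) (small_title : List String) : Prop :=
  title_index.length ≤ title.length
instance (title_index : List Int) (small_title_index : List Int) (title : List String) (small_title : List String) : Decidable (Pre_title_smallTitle title_index small_title_index title small_title) := by unfold Pre_title_smallTitle; infer_instance

def pvWitness_title_smallTitle : List Int × List Int × List String × List String :=
  ([1, 5, 9], [2, 3, 6, 7], ["a", "b", "c"], ["s1", "s2", "s3", "s4"])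

def Spec_title_smallTitle (title_index : List Int) (small_title_index : List Int) (title : List String) (small_title : List String) (out : List (List (String × List String))) : Prop := out = title_smallTitle_alt title_index small_title_index title small_title
instance (title_index : List Int) (small_title_index : List Int) (title : List String) (small_title : List String) (out : List (List (String × List String))) : Decidable (Spec_title_smallTitle title_index small_title_index title small_title out) := by unfold Spec_title_smallTitle; infer_instance

-- ===== CLAIM (what is proved, stated in full; the proofs are below) =====
def Claim_equal_title_smallTitle : Prop := ∀ (title_index : List Int) (small_title_index : List Int) (title : List String) (small_title : List String), Dom_title_smallTitle title_index small_title_index title small_title → Pre_title_smallTitle title_index small_title_index title small_title → Spec_title_smallTitle title_index small_title_index title small_title (title_smallTitle title_index small_title_index title small_title)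

-- ===== LEMMAS AND PROOFS =====

-- In a ≤-sorted list, the first occurrence of a member v sits at position countP (· < v).
lemma index?_pairwise_eq_countP (v : Int) :
    ∀ (ts : List Int), ts.Pairwise (· ≤ ·) → v ∈ ts →
      PySem.List.index? ts v = some (ts.countP (fun x => decide (x < v))) := by
  intro ts
  induction ts with
  | nil => intro _ h; simp at h
  | cons x xs ih =>
    intro hp hv
    have hle : ∀ y ∈ xs, x ≤ y := (List.pairwise_cons.mp hp).1
    have hpx : xs.Pairwise (· ≤ ·) := (List.pairwise_cons.mp hp).2
    by_cases hx : x = v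
    · subst hx
      rw [PySem.List.index?_cons_self]
      have h0 : xs.countP (fun y => decide (y < x)) = 0 := by
        rw [List.countP_eq_zero]
        intro y hy
        simp only [decide_eq_true_eq]
        exact not_lt.mpr (hle y hy)
      simp [h0]
    · have hvx : v ∈ xs := by
        rcases List.mem_cons.mp hv with h | h
        · exact absurd h.symm hx
        · exact h
      have hxv : x < v := lt_of_le_of_ne (hle v hvx) hx
      rw [PySem.List.index?_cons_of_ne _ hx, ih hpx hvx]
      simp [hxv]

-- the rank function computes countP over the concatenation
lemma pvRank_eq_countP (ti sti : List Int) (v : Int) :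
    pvRank ti sti v = (((ti ++ sti).countP (fun x => decide (x < v)) : Nat) : Int) := by
  unfold pvRank
  rw [PySem.List.foldl_ite_add_one (fun x => x < v), PySem.List.foldl_ite_add_one (fun x => x < v), List.countP_append]
  push_cast
  ring

-- position of a member of the sorted concatenation, read through getD, is its rank
lemma index?_sorted_getD (ti sti : List Int) (v : Int) (hv : v ∈ ti ++ sti) :
    (((PySem.List.index? (PySem.List.sorted (ti ++ sti) (fun x => x)) v).getD 0 : Nat) : Int)
      = pvRank ti sti v := by
  set ts := PySem.List.sorted (ti ++ sti) (fun x => x) with hts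
  have hp : ts.Pairwise (· ≤ ·) := PySem.List.sorted_pairwise (ti ++ sti) (fun x => x)
  have hmem : v ∈ ts := by rw [hts, PySem.List.mem_sorted]; exact hv
  rw [index?_pairwise_eq_countP v ts hp hmem, Option.getD_some,
      (PySem.List.sorted_perm (ti ++ sti) (fun x => x) false).countP_eq,
      pvRank_eq_countP]

lemma index?_getD_lt {ts : List Int} {v : Int} (hv : v ∈ ts) :
    ((PySem.List.index? ts v).getD 0) < ts.length := by
  cases h : PySem.List.index? ts v with
  | none => exact absurd hv ((PySem.List.index?_eq_none_iff _ _).mp h)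
  | some i =>
    rcases PySem.List.getElem_of_index?_eq_some h with ⟨hk, -, -⟩
    simpa using hk

-- ranks.getD through the map
lemma ranks_getD (ti sti : List Int) (j : Nat) (hj : j < ti.length) :
    (ti.map (pvRank ti sti)).getD j 0 = pvRank ti sti (ti.getD j 0) := by
  rw [List.getD_eq_getElem _ _ (by simpa using hj), List.getElem_map,
      List.getD_eq_getElem _ _ hj]

theorem title_smallTitle_eq_alt (ti sti : List Int) (t st : List String) :
    title_smallTitle ti sti t st = title_smallTitle_alt ti sti t st := by
  unfold title_smallTitle title_smallTitle_alt
  simp only []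
  set ts := PySem.List.sorted (ti ++ sti) (fun x => x) with hts
  set m := ti.length with hm
  set ranks := ti.map (pvRank ti sti) with hranks
  have hlen : ts.length = ti.length + sti.length := by
    rw [hts]; simpa using (PySem.List.sorted_perm (ti ++ sti) (fun x => x) false).length_eq
  have hmemti : ∀ i, i < m → ti.getD i 0 ∈ ti ++ sti := by
    intro i hi
    rw [List.getD_eq_getElem ti 0 hi]
    exact List.mem_append_left _ (List.getElem_mem hi)
  rcases Nat.eq_zero_or_pos m with hm0 | hmpos
  · simp [hm0]
  · -- split A's range m into range (m-1) ++ [m-1]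
    have hrange : List.range m = List.range (m - 1) ++ [m - 1] := by
      conv_lhs => rw [show m = (m - 1) + 1 by omega]
      rw [List.range_succ]
    rw [hrange, List.foldl_append, if_pos hmpos]
    -- the common step over range (m-1): A's branch test is true there
    have hstep : ∀ (acc : List (List (String × List String)) × Int) (j : Nat),
        j ∈ List.range (m - 1) →
        (if j ≠ m - 1 then
          let ind1 : Nat := (PySem.List.index? ts (ti.getD j 0)).getD 0
          let ind2 : Nat := (PySem.List.index? ts (ti.getD (j + 1) 0)).getD 0
          let s : Nat := (PySem.List.slice ts (some ((ind1 : Int) + 1)) (some (ind2 : Int))).length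
          let d' := acc.2 + (s : Int)
          (acc.1 ++ [[(t.getD j "", PySem.List.slice st (some (d' - (s : Int))) (some d'))]], d')
        else
          let ind1 : Nat := (PySem.List.index? ts (ti.getD j 0)).getD 0
          let s : Nat := (PySem.List.slice ts (some ((ind1 : Int) + 1)) none).length
          (acc.1 ++ [[(t.getD j "", PySem.List.slice st (some (acc.2 - (s : Int))) (some acc.2))]], acc.2))
        = (let s : Int := max 0 (ranks.getD (j + 1) 0 - ranks.getD j 0 - 1)
           let d := acc.2 + s
           (acc.1 ++ [[(t.getD j "", PySem.List.slice st (some (d - s)) (some d))]], d)) := by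
      intro acc j hjr
      have hj : j < m - 1 := List.mem_range.mp hjr
      rw [if_pos (by omega : j ≠ m - 1)]
      have hj1 : j + 1 < m := by omega
      have hjm : j < m := by omega
      have h1 := index?_getD_lt (show ti.getD j 0 ∈ ts by
        rw [hts, PySem.List.mem_sorted]; exact hmemti j hjm)
      have h2 := index?_getD_lt (show ti.getD (j + 1) 0 ∈ ts by
        rw [hts, PySem.List.mem_sorted]; exact hmemti (j + 1) hj1)
      set i1 : Nat := (PySem.List.index? ts (ti.getD j 0)).getD 0 with hi1
      set i2 : Nat := (PySem.List.index? ts (ti.getD (j + 1) 0)).getD 0 with hi2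
      have hr1 : ((i1 : Nat) : Int) = ranks.getD j 0 := by
        rw [hranks, ranks_getD ti sti j hjm, hi1, hts]
        exact index?_sorted_getD ti sti _ (hmemti j hjm)
      have hr2 : ((i2 : Nat) : Int) = ranks.getD (j + 1) 0 := by
        rw [hranks, ranks_getD ti sti (j + 1) hj1, hi2, hts]
        exact index?_sorted_getD ti sti _ (hmemti (j + 1) hj1)
      have hs : ((PySem.List.slice ts (some ((i1 : Int) + 1)) (some (i2 : Int))).length : Int)
          = max 0 (ranks.getD (j + 1) 0 - ranks.getD j 0 - 1) := by
        rw [PySem.List.length_slice]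
        have e1 : ((i1 : Int) + 1) = ((i1 + 1 : Nat) : Int) := by push_cast; ring
        rw [e1, PySem.List.clampIdx_natCast, PySem.List.clampIdx_natCast, ← hr1, ← hr2]
        omega
      simp only [← hs]
    rw [PySem.List.foldl_congr_mem _ _ _ _ hstep]
    -- the last step: A's branch test is false at j = m - 1
    set acc := (List.range (m - 1)).foldl (fun (st' : List (List (String × List String)) × Int) j =>
      let s : Int := max 0 (ranks.getD (j + 1) 0 - ranks.getD j 0 - 1)
      let d := st'.2 + s
      (st'.1 ++ [[(t.getD j "", PySem.List.slice st (some (d - s)) (some d))]], d)) ([], 0)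
    simp only [List.foldl_cons, List.foldl_nil, if_neg (by omega : ¬ (m - 1 ≠ m - 1))]
    have hjm : m - 1 < m := by omega
    have h1 := index?_getD_lt (show ti.getD (m - 1) 0 ∈ ts by
      rw [hts, PySem.List.mem_sorted]; exact hmemti (m - 1) hjm)
    set i1 : Nat := (PySem.List.index? ts (ti.getD (m - 1) 0)).getD 0 with hi1
    have hr1 : ((i1 : Nat) : Int) = ranks.getD (m - 1) 0 := by
      rw [hranks, ranks_getD ti sti (m - 1) hjm, hi1, hts]
      exact index?_sorted_getD ti sti _ (hmemti (m - 1) hjm)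
    have hs : ((PySem.List.slice ts (some ((i1 : Int) + 1)) none).length : Int)
        = ((m : Int) + (sti.length : Int)) - 1 - ranks.getD (m - 1) 0 := by
      have e1 : ((i1 : Int) + 1) = ((i1 + 1 : Nat) : Int) := by push_cast; ring
      rw [e1, PySem.List.slice_from_natCast]
      simp only [List.length_drop]
      rw [← hr1]
      omega
    simp only [← hs]

-- ===== VERDICT (by name: the statement is the Claim_ definition above) =====
theorem title_smallTitle_spec : Claim_equal_title_smallTitle := by
  intro ti sti t st _ _
  unfold Spec_title_smallTitle
  exact title_smallTitle_eq_alt ti sti t st
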